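-- pv_equiv track=rewrite | github.com/anant123490/live-face-movement-using-cnn-and-lstm | ml/app.py | _smoothed_detected
-- ===== SOURCE A (Python) =====
-- from collections import Counter, deque
--
-- def _smoothed_detected(history):
--     if not history:
--         return "none"
--     total = Counter()
--     for item in history:
--         counts = item.get("detected_counts") or {}
--         total.update(counts)
--     if not total:
--         return "none"
--     ordered = sorted(total.items(), key=lambda x: x[0])
--     return ", ".join(f"{count} {label}" for label, count in ordered)
-- ===== SOURCE B (Python) =====
-- def _smoothed_detected(history):
--     pairs = []
--     for item in history:
--         for pair in (item.get("detected_counts") or {}).items():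
--             pairs.append(pair)
--     pairs.sort(key=lambda p: p[0])
--     if not pairs:
--         return "none"
--     segments = []
--     cur_label, cur_sum = pairs[0]
--     for label, count in pairs[1:]:
--         if label == cur_label:
--             cur_sum += count
--         else:
--             segments.append(f"{cur_sum} {cur_label}")
--             cur_label, cur_sum = label, count
--     segments.append(f"{cur_sum} {cur_label}")
--     return ", ".join(segments)
-- ===== Notes on version B (the rewrite author's own statement) =====
-- stated objective: alternative
-- what changed: Replaces the Counter/dict aggregation followed by sorting the dict items with a single flat list of all (label,count) pairs that is sorted by label and then summed in one group-by-run pass, so no dictionary is built at all.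
import Mathlib
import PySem

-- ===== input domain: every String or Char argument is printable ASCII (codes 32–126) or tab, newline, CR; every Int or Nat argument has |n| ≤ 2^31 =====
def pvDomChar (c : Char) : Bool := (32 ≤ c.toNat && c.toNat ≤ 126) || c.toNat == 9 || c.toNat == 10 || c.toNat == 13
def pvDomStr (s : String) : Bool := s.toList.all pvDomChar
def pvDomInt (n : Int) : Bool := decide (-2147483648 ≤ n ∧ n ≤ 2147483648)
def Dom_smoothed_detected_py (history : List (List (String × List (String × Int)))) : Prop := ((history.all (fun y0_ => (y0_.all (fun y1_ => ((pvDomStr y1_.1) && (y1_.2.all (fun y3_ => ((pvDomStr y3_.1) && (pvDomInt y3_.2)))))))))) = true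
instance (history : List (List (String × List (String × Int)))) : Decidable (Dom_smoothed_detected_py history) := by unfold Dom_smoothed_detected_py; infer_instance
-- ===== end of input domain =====

-- B replaces A's Counter/dict aggregation + item sort by flattening all (label,count)
-- pairs, sorting them by label and summing in one group-by-run pass (no dict at all);
-- objective: alternative (same asymptotic cost).

-- ===== PORT A =====
def smoothed_detected_py (history : List (List (String × List (String × Int)))) : String :=
  if history = [] then "none"
  else
    let total : PySem.Dict String Int :=
      history.foldl (fun total item =>
        -- counts = item.get("detected_counts") or {}  (None and the empty dict both become {})
        let counts := ((PySem.Dict.mk item).get? "detected_counts").getD []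
        -- total.update(counts): add each count, overwrite keeps position, new keys append
        counts.foldl (fun t p => t.insert p.1 (t.getD p.1 0 + p.2)) total)
        PySem.Dict.empty
    if total.items = [] then "none"
    else
      PySem.Str.join ", "
        ((PySem.List.sorted total.items (fun x => x.1) false).map
          (fun lc => PySem.Int.toStr lc.2 ++ " " ++ lc.1))

-- ===== PORT B =====
-- one step of Source B's grouping loop: state = (segments, cur_label, cur_sum)
def pvGroupStep (st : List String × String × Int) (p : String × Int) :
    List String × String × Int :=
  if p.1 = st.2.1 then (st.1, st.2.1, st.2.2 + p.2)
  else (st.1 ++ [PySem.Int.toStr st.2.2 ++ " " ++ st.2.1], p.1, p.2)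

def smoothed_detected_py_alt (history : List (List (String × List (String × Int)))) : String :=
  let pairs := history.foldl (fun acc item =>
      ((((PySem.Dict.mk item).get? "detected_counts").getD []).foldl
        (fun a p => a ++ [p]) acc)) []
  match PySem.List.sorted pairs (fun p => p.1) false with
  | [] => "none"
  | p0 :: rest =>
    let st := rest.foldl pvGroupStep ([], p0.1, p0.2)
    PySem.Str.join ", " (st.1 ++ [PySem.Int.toStr st.2.2 ++ " " ++ st.2.1])

-- ===== PRECONDITION & SPEC =====
def Spec_smoothed_detected_py (history : List (List (String × List (String × Int)))) (out : String) : Prop := out = smoothed_detected_py_alt history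
instance (history : List (List (String × List (String × Int)))) (out : String) : Decidable (Spec_smoothed_detected_py history out) := by unfold Spec_smoothed_detected_py; infer_instance

-- ===== CLAIM (what is proved, stated in full; the proofs are below) =====
def Claim_equal_smoothed_detected_py : Prop := ∀ (history : List (List (String × List (String × Int)))), Dom_smoothed_detected_py history → Spec_smoothed_detected_py history (smoothed_detected_py history)

-- ===== LEMMAS AND PROOFS =====

-- the flat pair list both programs effectively aggregate
def pvPairs (history : List (List (String × List (String × Int)))) : List (String × Int) :=
  history.flatMap (fun item => ((PySem.Dict.mk item).get? "detected_counts").getD [])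

-- total count of label k in L
def pvSum (L : List (String × Int)) (k : String) : Int :=
  ((L.filter (fun p => p.1 = k)).map (·.2)).sum

-- the distinct labels of L in sorted order
def pvKeyList (L : List (String × Int)) : List String :=
  ((PySem.List.sorted L (fun p => p.1) false).map (·.1)).dedup

-- reference recursion for Source B's grouping pass, producing (label, run-sum) pairs
def pvAccRun : String → Int → List (String × Int) → List (String × Int)
  | l, s, [] => [(l, s)]
  | l, s, p :: rest =>
      if p.1 = l then pvAccRun l (s + p.2) rest else (l, s) :: pvAccRun p.1 p.2 rest

theorem pvSum_cons (q : String × Int) (S : List (String × Int)) (k : String) :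
    pvSum (q :: S) k = (if q.1 = k then q.2 else 0) + pvSum S k := by
  by_cases h : q.1 = k
  · simp [pvSum, h]
  · simp [pvSum, h]

theorem pvSum_eq_zero (S : List (String × Int)) (k : String)
    (h : k ∉ S.map (·.1)) : pvSum S k = 0 := by
  induction S with
  | nil => simp [pvSum]
  | cons q rest ih =>
      simp only [List.map_cons, List.mem_cons] at h
      push Not at h
      rw [pvSum_cons, ih h.2, if_neg (fun e => h.1 e.symm)]
      simp

theorem pvSum_perm {S T : List (String × Int)} (h : S.Perm T) (k : String) :
    pvSum S k = pvSum T k := by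
  exact List.Perm.sum_eq (List.Perm.map _ (List.Perm.filter _ h))

theorem pvPairs_fold (history : List (List (String × List (String × Int))))
    (acc : List (String × Int)) :
    history.foldl (fun acc item =>
        ((((PySem.Dict.mk item).get? "detected_counts").getD []).foldl
          (fun a p => a ++ [p]) acc)) acc
      = acc ++ pvPairs history := by
  simp only [PySem.List.foldl_append_singleton]
  induction history generalizing acc with
  | nil => simp [pvPairs]
  | cons item rest ih =>
      simp only [List.foldl_cons, ih, pvPairs, List.flatMap_cons, List.append_assoc]

theorem pvDict_fold (history : List (List (String × List (String × Int))))
    (d : PySem.Dict String Int) :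
    history.foldl (fun t item =>
        ((((PySem.Dict.mk item).get? "detected_counts").getD []).foldl
          (fun t p => t.insert p.1 (t.getD p.1 0 + p.2)) t)) d
      = (pvPairs history).foldl (fun t p => t.insert p.1 (t.getD p.1 0 + p.2)) d := by
  induction history generalizing d with
  | nil => simp [pvPairs]
  | cons item rest ih =>
      simp only [List.foldl_cons, ih, pvPairs, List.flatMap_cons, List.foldl_append]

theorem pvDict_getD (L : List (String × Int)) (d : PySem.Dict String Int) (k : String) :
    (L.foldl (fun t p => t.insert p.1 (t.getD p.1 0 + p.2)) d).getD k 0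
      = d.getD k 0 + pvSum L k := by
  induction L generalizing d with
  | nil => simp [pvSum]
  | cons p rest ih =>
      rw [List.foldl_cons, ih, pvSum_cons, PySem.Dict.getD_insert]
      by_cases h : p.1 = k
      · rw [if_pos h.symm, if_pos h, h]; ring
      · rw [if_neg (fun hk => h hk.symm), if_neg h]; ring

theorem pvDict_keys (L : List (String × Int)) :
    (L.foldl (fun t p => t.insert p.1 (t.getD p.1 0 + p.2)) PySem.Dict.empty).keys
      = PySem.Set.ofList (L.map (·.1)) := by
  rw [PySem.Dict.keys_foldl_insert_key]
  rfl

theorem pvDict_nodup (L : List (String × Int)) :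
    (L.foldl (fun t p => t.insert p.1 (t.getD p.1 0 + p.2)) PySem.Dict.empty).keys.Nodup :=
  PySem.Dict.nodup_keys_foldl_insert_key L _ _ _ (by simp)

theorem pvKeyList_pairwise (L : List (String × Int)) :
    (pvKeyList L).Pairwise (· < ·) := by
  have hle : (pvKeyList L).Pairwise (· ≤ ·) :=
    (PySem.List.sorted_map_key_pairwise (xs := L) (key := fun p => p.1)).sublist
      (List.dedup_sublist _)
  have hne : (pvKeyList L).Nodup := by
    unfold pvKeyList
    exact List.nodup_dedup _
  exact (hle.and hne).imp (fun h => lt_of_le_of_ne h.1 h.2)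

theorem pvKeyList_perm (L : List (String × Int)) :
    (pvKeyList L).Perm (PySem.Set.ofList (L.map (·.1))) := by
  refine (List.perm_ext_iff_of_nodup (List.nodup_dedup _) (PySem.Set.nodup_ofList _)).mpr ?_
  intro a
  simp [PySem.Set.mem_ofList, PySem.List.mem_sorted]

-- A's sorted item list in closed form
theorem pvA_sorted (L : List (String × Int)) :
    PySem.List.sorted
        (L.foldl (fun t p => t.insert p.1 (t.getD p.1 0 + p.2)) PySem.Dict.empty).items
        (fun x => x.1) false
      = (pvKeyList L).map (fun k => (k, pvSum L k)) := by
  set d := L.foldl (fun t p => t.insert p.1 (t.getD p.1 0 + p.2)) PySem.Dict.empty with hd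
  have hkeys : d.keys = PySem.Set.ofList (L.map (·.1)) := by rw [hd]; exact pvDict_keys L
  have hfun : (fun k => (k, d.getD k 0)) = (fun k : String => (k, pvSum L k)) := by
    funext k
    rw [hd, pvDict_getD]
    simp
  have hitems : d.items = d.keys.map (fun k => (k, d.getD k 0)) :=
    PySem.Dict.items_eq_map_keys d (by rw [hd]; exact pvDict_nodup L) 0
  apply PySem.List.sorted_eq_of_perm_of_pairwise_lt
  · rw [hitems, hfun, hkeys]
    exact (pvKeyList_perm L).map _
  · rw [List.pairwise_map]
    exact pvKeyList_pairwise L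

theorem pvGroup_fold (S : List (String × Int)) (segs : List String) (l : String) (s : Int) :
    (S.foldl pvGroupStep (segs, l, s)).1
        ++ [PySem.Int.toStr (S.foldl pvGroupStep (segs, l, s)).2.2 ++ " "
              ++ (S.foldl pvGroupStep (segs, l, s)).2.1]
      = segs ++ (pvAccRun l s S).map (fun q => PySem.Int.toStr q.2 ++ " " ++ q.1) := by
  induction S generalizing segs l s with
  | nil => simp [pvAccRun]
  | cons p rest ih =>
      by_cases h : p.1 = l
      · simp only [List.foldl_cons, pvGroupStep, if_pos h, pvAccRun, ih]
      · simp only [List.foldl_cons, pvGroupStep, if_neg h, pvAccRun, ih, List.map_cons]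
        simp

theorem pvAccRun_canon (S : List (String × Int)) (l : String) (c : Int)
    (h : ((l, c) :: S).Pairwise (fun a b => a.1 ≤ b.1)) :
    pvAccRun l c S
      = (((l, c) :: S).map (·.1)).dedup.map (fun k => (k, pvSum ((l, c) :: S) k)) := by
  induction S generalizing l c with
  | nil => simp [pvAccRun, pvSum]
  | cons p rest ih =>
      rw [List.pairwise_cons] at h
      obtain ⟨hl, htail⟩ := h
      rw [List.pairwise_cons] at htail
      obtain ⟨hp1, hrest⟩ := htail
      by_cases hp : p.1 = l
      · have hpair : ((l, c + p.2) :: rest).Pairwise (fun a b => a.1 ≤ b.1) :=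
          List.pairwise_cons.mpr ⟨fun b hb => hl b (List.mem_cons.mpr (Or.inr hb)), hrest⟩
        have hfun : (fun k : String => (k, pvSum ((l, c + p.2) :: rest) k))
            = (fun k : String => (k, pvSum ((l, c) :: p :: rest) k)) := by
          funext k
          simp only [pvSum_cons, hp]
          split_ifs <;> simp <;> ring
        simp only [pvAccRun, if_pos hp, ih l (c + p.2) hpair, hfun]
        have : ((((l, c) :: p :: rest).map (·.1)).dedup)
            = ((((l, c + p.2) :: rest).map (·.1)).dedup) := by
          simp only [List.map_cons, hp]
          rw [List.dedup_cons_of_mem (List.mem_cons_self)]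
        rw [this]
      · have hlt : ∀ b ∈ (p :: rest).map (fun q => q.1), l < b := by
          intro b hb
          simp only [List.mem_map, List.mem_cons] at hb
          obtain ⟨q, hq, rfl⟩ := hb
          rcases hq with rfl | hq
          · exact lt_of_le_of_ne (hl q List.mem_cons_self) (fun e => hp e.symm)
          · exact lt_of_lt_of_le
              (lt_of_le_of_ne (hl p List.mem_cons_self) (fun e => hp e.symm)) (hp1 q hq)
        have hnm : l ∉ ((p :: rest).map (fun q => q.1)) := fun hm => absurd rfl (ne_of_lt (hlt l hm))
        have hpair : ((p.1, p.2) :: rest).Pairwise (fun a b => a.1 ≤ b.1) :=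
          List.pairwise_cons.mpr ⟨hp1, hrest⟩
        have hz : pvSum (p :: rest) l = 0 := pvSum_eq_zero _ _ hnm
        simp only [pvAccRun, if_neg hp]
        rw [ih p.1 p.2 hpair]
        have hded : (((l, c) :: p :: rest).map (·.1)).dedup
            = l :: (((p.1, p.2) :: rest).map (·.1)).dedup := by
          simp only [List.map_cons]
          exact List.dedup_cons_of_notMem (by simpa using hnm)
        rw [hded, List.map_cons]
        congr 1
        · show (l, c) = (l, pvSum ((l, c) :: p :: rest) l)
          rw [pvSum_cons]
          simp [hz]
        · apply List.map_congr_left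
          intro k hk
          have hkmem : k ∈ ((p.1, p.2) :: rest).map (·.1) := List.mem_dedup.mp hk
          have hkl : l ≠ k := by
            intro e
            subst e
            exact hnm (by simpa using hkmem)
          simp [pvSum_cons, hkl]

theorem pv_main (history : List (List (String × List (String × Int)))) :
    smoothed_detected_py history = smoothed_detected_py_alt history := by
  simp only [smoothed_detected_py, smoothed_detected_py_alt]
  rw [pvDict_fold, pvPairs_fold, List.nil_append]
  rcases hS : PySem.List.sorted (pvPairs history) (fun p => p.1) false with _ | ⟨p0, rest⟩
  · have hL : pvPairs history = [] := (PySem.List.sorted_eq_nil_iff _ _ _).mp hS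
    rw [hL]
    by_cases hh : history = []
    · rw [if_pos hh]
    · rw [if_neg hh, List.foldl_nil,
        if_pos (show PySem.Dict.empty.items = [] from rfl)]
  · have hL : pvPairs history ≠ [] := by
      intro h
      rw [h] at hS
      exact absurd hS.symm (List.cons_ne_nil _ _)
    have hh : history ≠ [] := fun h => hL (by simp [pvPairs, h])
    obtain ⟨q, qs, hq⟩ := List.exists_cons_of_ne_nil hL
    have hitems : (List.foldl (fun t p => t.insert p.1 (t.getD p.1 0 + p.2))
        PySem.Dict.empty (pvPairs history)).items ≠ [] := by
      intro hit
      have hk := pvDict_keys (pvPairs history)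
      have : q.1 ∈ PySem.Set.ofList ((pvPairs history).map (·.1)) := by
        rw [PySem.Set.mem_ofList]
        exact List.mem_map_of_mem (hq ▸ List.mem_cons_self)
      rw [← hk] at this
      simp only [PySem.Dict.keys, hit] at this
      simp at this
    rw [if_neg hh, if_neg hitems, pvA_sorted]
    change _ = PySem.Str.join ", " ((List.foldl pvGroupStep ([], p0.1, p0.2) rest).1 ++
      [PySem.Int.toStr (List.foldl pvGroupStep ([], p0.1, p0.2) rest).2.2 ++ " " ++
          (List.foldl pvGroupStep ([], p0.1, p0.2) rest).2.1])
    -- B side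
    have hpw : (p0 :: rest).Pairwise (fun a b : String × Int => a.1 ≤ b.1) := by
      have := PySem.List.sorted_pairwise (xs := pvPairs history) (key := fun p => p.1)
      rw [hS] at this
      exact this
    have hrun := pvGroup_fold rest [] p0.1 p0.2
    rw [List.nil_append] at hrun
    rw [hrun]
    have hcanon := pvAccRun_canon rest p0.1 p0.2 (by simpa using hpw)
    rw [hcanon]
    have hperm : ((p0.1, p0.2) :: rest).Perm (pvPairs history) := by
      have := PySem.List.sorted_perm (xs := pvPairs history) (key := fun p => p.1)
        (rev := false)
      rw [hS] at this
      simpa using this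
    have hkl : (((p0.1, p0.2) :: rest).map (·.1)).dedup = pvKeyList (pvPairs history) := by
      simp only [pvKeyList, hS]
    rw [hkl, List.map_map, List.map_map]
    congr 1
    apply List.map_congr_left
    intro k hk
    simp only [Function.comp]
    rw [pvSum_perm hperm k]

-- ===== VERDICT (by name: the statement is the Claim_ definition above) =====
theorem smoothed_detected_py_spec : Claim_equal_smoothed_detected_py := by
  intro history _
  unfold Spec_smoothed_detected_py
  exact pv_main history
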